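-- pv_equiv track=rewrite | github.com/Gwolfgit/MatrixCMD | app/matrix_api/modules/matrix_hex.py | pack_data
-- ===== SOURCE A (Python) =====
-- def pack_data(data) -> list:
--     """
--     Pack a list of bytes into 1029-byte packets.
--
--     :param data: A list of bytes to be packed.
--     :return: A list of packets, each consisting of 1029 bytes.
--     """
--     # Convert data to list of integers
--     data = list(data)
--     # Create list to hold upgrade packages
--     upgrade_packages = []
--
--     # Initialize variables
--     num = 0xfe + 0xef
--     verify = 0
--     index = 0
--     cmd = "fe,ef,00,00,"
--
--     # Pad data with 0xFF to reach multiple of 1024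
--     if len(data) % 1024 != 0:
--         count = 1024 - len(data) % 1024
--         data += [255] * count
--
--     # Split data into upgrade packages
--     for i in range(len(data)):
--         # Add data value to num
--         num += data[i]
--         # Append data value to cmd
--         cmd += format(data[i], '02x') + ","
--         # If 1024-byte boundary is reached, complete package and append to upgrade packages
--         if (i + 1) % 1024 == 0:
--             verify = (0x100 - num % 256)
--             # Convert verify to hex string and remove leading 0x and trailing digit if it is 0
--             verify = format(verify, '02x').replace("00", "")[-2:]
--             cmd += verify
--             upgrade_packages.append(cmd)
--             index += 1
--             num = 0xfe + 0xef + index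
--             if i == len(data) - 1 - 1024:
--                 num += 0x80
--                 cmd = "fe,ef,80," + format(index, '02x') + ","
--             else:
--                 cmd = "fe,ef,00," + format(index, '02x') + ","
--     return upgrade_packages
-- ===== SOURCE B (Python) =====
-- def pack_data(data) -> list:
--     """Pack a list of bytes into 1029-byte packets (block-wise decomposition)."""
--     data = list(data)
--     if len(data) % 1024:
--         data += [255] * (1024 - len(data) % 1024)
--     nblocks = len(data) // 1024
--     packets = []
--     for k in range(nblocks):
--         block = data[k * 1024:(k + 1) * 1024]
--         last = nblocks >= 2 and k == nblocks - 1
--         num = 0xfe + 0xef + k + (0x80 if last else 0) + sum(block)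
--         verify = format(0x100 - num % 256, '02x').replace('00', '')[-2:]
--         packets.append('fe,ef,' + ('80' if last else '00') + ',' + format(k, '02x') + ','
--                        + ''.join(format(b, '02x') + ',' for b in block) + verify)
--     return packets
-- ===== Notes on version B (the rewrite author's own statement) =====
-- stated objective: simpler
-- what changed: B pads first, then builds each packet independently from its 1024-byte slice with a closed per-block formula (header/num/verify from the block index and block sum), instead of A's single byte-by-byte loop that threads num/cmd/index state across packet boundaries.
import Mathlib
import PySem

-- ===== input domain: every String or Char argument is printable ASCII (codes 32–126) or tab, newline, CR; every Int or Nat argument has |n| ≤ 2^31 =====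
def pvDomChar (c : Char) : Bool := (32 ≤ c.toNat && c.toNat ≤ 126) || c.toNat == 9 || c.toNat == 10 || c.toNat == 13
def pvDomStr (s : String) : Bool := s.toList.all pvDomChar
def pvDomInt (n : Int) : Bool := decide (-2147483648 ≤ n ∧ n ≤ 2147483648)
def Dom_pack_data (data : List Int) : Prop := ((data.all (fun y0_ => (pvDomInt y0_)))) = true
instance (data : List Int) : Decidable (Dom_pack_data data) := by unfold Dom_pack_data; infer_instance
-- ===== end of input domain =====

-- B re-packs the padded data block-by-block with a per-block closed formula instead of A's
-- single byte-by-byte loop threading num/cmd/index state across packet boundaries (objective: simpler).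

-- ===== PORT A =====
-- format(n, '02x'): lowercase hex of |n|, '-' for negatives, zero-padded to total width 2 (sign included)
def pyHex2 (n : Int) : String :=
  let ds := Nat.toDigits 16 n.natAbs
  let w := (if n < 0 then 1 else 0) + ds.length
  (if n < 0 then "-" else "") ++ String.ofList (List.replicate (2 - w) '0' ++ ds)

-- format(0x100 - num % 256, '02x').replace("00", "")[-2:]
def pyVerify (num : Int) : String :=
  PySem.Str.slice (PySem.Str.replace (pyHex2 (256 - PySem.Int.mod num 256)) "00" "") (some (-2)) none

-- the 'for i in range(len(data))' loop of A, as structural recursion on the remaining bytes with the index i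
def packLoop (len : Nat) : List Int → Nat → Int → String → Int → List String → List String
  | [], _, _, _, _, pkgs => pkgs
  | d :: rest, i, num, cmd, index, pkgs =>
    let num := num + d
    let cmd := cmd ++ pyHex2 d ++ ","
    if (i + 1) % 1024 = 0 then
      let cmd := cmd ++ pyVerify num
      let pkgs := pkgs ++ [cmd]
      let index := index + 1
      if (i : Int) = (len : Int) - 1 - 1024 then
        packLoop len rest (i + 1) (0xfe + 0xef + index + 0x80) ("fe,ef,80," ++ pyHex2 index ++ ",") index pkgs
      else
        packLoop len rest (i + 1) (0xfe + 0xef + index) ("fe,ef,00," ++ pyHex2 index ++ ",") index pkgs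
    else
      packLoop len rest (i + 1) num cmd index pkgs

def pack_data (data : List Int) : List String :=
  let data := if data.length % 1024 ≠ 0 then data ++ List.replicate (1024 - data.length % 1024) 255 else data
  packLoop data.length data 0 (0xfe + 0xef) "fe,ef,00,00," 0 []

-- ===== PORT B =====
def packetB (padded : List Int) (n : Nat) (k : Nat) : String :=
  let block := PySem.List.slice padded (some ((k * 1024 : Nat) : Int)) (some (((k + 1) * 1024 : Nat) : Int))
  let num : Int := 0xfe + 0xef + (k : Int) + (if 2 ≤ n ∧ k = n - 1 then 0x80 else 0) + block.sum
  "fe,ef," ++ (if 2 ≤ n ∧ k = n - 1 then "80" else "00") ++ "," ++ pyHex2 (k : Int) ++ ","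
    ++ PySem.Str.join "" (block.map (fun b => pyHex2 b ++ ",")) ++ pyVerify num

def pack_data_alt (data : List Int) : List String :=
  let padded := if data.length % 1024 ≠ 0 then data ++ List.replicate (1024 - data.length % 1024) 255 else data
  let n := padded.length / 1024
  (List.range n).map (packetB padded n)

-- ===== PRECONDITION & SPEC =====
def Spec_pack_data (data : List Int) (out : List String) : Prop := out = pack_data_alt data
instance (data : List Int) (out : List String) : Decidable (Spec_pack_data data out) := by unfold Spec_pack_data; infer_instance

-- ===== CLAIM (what is proved, stated in full; the proofs are below) =====
def Claim_equal_pack_data : Prop := ∀ (data : List Int), Dom_pack_data data → Spec_pack_data data (pack_data data)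

-- ===== LEMMAS AND PROOFS =====

-- ''.join over a cons
lemma strjoin_empty_cons (x : String) (l : List String) :
    PySem.Str.join "" (x :: l) = x ++ PySem.Str.join "" l := by
  cases l with
  | nil => simp [PySem.Str.join, PySem.Chars.join_singleton, PySem.Chars.join_nil]
  | cons b l => simp [PySem.Str.join, PySem.Chars.join_cons_cons, String.ofList_append]

lemma strjoin_empty_nil : PySem.Str.join "" ([] : List String) = "" := by decide

lemma strjoin_empty_append (l1 l2 : List String) :
    PySem.Str.join "" (l1 ++ l2) = PySem.Str.join "" l1 ++ PySem.Str.join "" l2 := by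
  induction l1 with
  | nil => simp [strjoin_empty_nil]
  | cons x l ih => simp [strjoin_empty_cons, List.cons_append, ih, String.append_assoc]

-- folding A's loop over bytes that hit no 1024-boundary just accumulates num and cmd
lemma packLoop_no_boundary (len : Nat) (bs rest : List Int) (i : Nat) (num : Int) (cmd : String)
    (index : Int) (pkgs : List String)
    (h : ∀ j < bs.length, (i + j + 1) % 1024 ≠ 0) :
    packLoop len (bs ++ rest) i num cmd index pkgs
      = packLoop len rest (i + bs.length) (num + bs.sum)
          (cmd ++ PySem.Str.join "" (bs.map (fun b => pyHex2 b ++ ","))) index pkgs := by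
  induction bs generalizing i num cmd with
  | nil => simp [strjoin_empty_nil]
  | cons d bs ih =>
    have h0 : (i + 1) % 1024 ≠ 0 := by have := h 0 (by simp); omega
    rw [List.cons_append, packLoop, if_neg h0,
        ih (i + 1) (num + d) (cmd ++ pyHex2 d ++ ",") (by intro j hj; have := h (j + 1) (by simp; omega); omega)]
    have e1 : i + 1 + bs.length = i + (d :: bs).length := by simp; omega
    have e2 : num + d + bs.sum = num + (d :: bs).sum := by simp [List.sum_cons]; ring
    have e3 : cmd ++ pyHex2 d ++ "," ++ PySem.Str.join "" (bs.map (fun b => pyHex2 b ++ ","))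
        = cmd ++ PySem.Str.join "" ((d :: bs).map (fun b => pyHex2 b ++ ",")) := by
      simp [List.map_cons, strjoin_empty_cons, String.append_assoc]
    rw [e1, e2, e3]

-- one full 1024-byte chunk from the entry state of block k produces exactly packetB k
set_option maxRecDepth 8192 in
lemma packLoop_chunks (n : Nat) (padded : List Int) (hlen : padded.length = n * 1024)
    (k : Nat) (hk : k ≤ n) (pkgs : List String) :
    packLoop (n * 1024) (padded.drop (k * 1024)) (k * 1024)
      (0xfe + 0xef + (k : Int) + (if 2 ≤ n ∧ k = n - 1 then 0x80 else 0))
      ("fe,ef," ++ (if 2 ≤ n ∧ k = n - 1 then "80" else "00") ++ "," ++ pyHex2 (k : Int) ++ ",")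
      (k : Int) pkgs
      = pkgs ++ (List.range' k (n - k)).map (packetB padded n) := by
  suffices H : ∀ m, ∀ k pkgs, k + m = n →
      packLoop (n * 1024) (padded.drop (k * 1024)) (k * 1024)
        (0xfe + 0xef + (k : Int) + (if 2 ≤ n ∧ k = n - 1 then 0x80 else 0))
        ("fe,ef," ++ (if 2 ≤ n ∧ k = n - 1 then "80" else "00") ++ "," ++ pyHex2 (k : Int) ++ ",")
        (k : Int) pkgs
        = pkgs ++ (List.range' k (n - k)).map (packetB padded n) by
    exact H (n - k) k pkgs (by omega)
  intro m
  induction m with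
  | zero =>
    intro k pkgs hkm
    have hk' : k = n := by omega
    subst hk'
    rw [List.drop_eq_nil_of_le (by omega), packLoop]
    simp
  | succ m ih =>
    intro k pkgs hkm
    have hklt : k < n := by omega
    have hchlen : ((padded.drop (k * 1024)).take 1024).length = 1024 := by
      simp [List.length_take, List.length_drop, hlen]; omega
    have hne : (padded.drop (k * 1024)).take 1024 ≠ [] := by
      intro hnil; rw [hnil] at hchlen; simp at hchlen
    obtain ⟨bs, d, hbd⟩ : ∃ bs d, (padded.drop (k * 1024)).take 1024 = bs ++ [d] :=
      ⟨_, _, (List.dropLast_append_getLast hne).symm⟩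
    have hbslen : bs.length = 1023 := by
      rw [hbd] at hchlen; simp at hchlen; omega
    have hsplit : padded.drop (k * 1024) = bs ++ [d] ++ padded.drop ((k + 1) * 1024) := by
      rw [← hbd, show (k + 1) * 1024 = k * 1024 + 1024 from by ring, ← List.drop_drop,
         List.take_append_drop]
    -- the packet A appends at the end of chunk k is exactly packetB padded n k
    have hpkt : "fe,ef," ++ (if 2 ≤ n ∧ k = n - 1 then "80" else "00") ++ "," ++ pyHex2 (k : Int) ++ ","
          ++ PySem.Str.join "" (bs.map (fun b => pyHex2 b ++ ",")) ++ pyHex2 d ++ ","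
          ++ pyVerify (0xfe + 0xef + (k : Int) + (if 2 ≤ n ∧ k = n - 1 then 0x80 else 0) + bs.sum + d)
        = packetB padded n k := by
      have hblock : PySem.List.slice padded (some ((k * 1024 : Nat) : Int)) (some (((k + 1) * 1024 : Nat) : Int))
          = bs ++ [d] := by
        rw [PySem.List.slice_natCast, ← hbd]
        congr 1
        omega
      rw [packetB]
      simp only [hblock]
      have hj : PySem.Str.join "" ((bs ++ [d]).map (fun b => pyHex2 b ++ ","))
          = PySem.Str.join "" (bs.map (fun b => pyHex2 b ++ ",")) ++ (pyHex2 d ++ ",") := by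
        rw [List.map_append, strjoin_empty_append]
        simp [strjoin_empty_cons, strjoin_empty_nil]
      rw [hj]
      have hnum : 0xfe + 0xef + (k : Int) + (if 2 ≤ n ∧ k = n - 1 then 0x80 else 0) + (bs ++ [d]).sum
          = 0xfe + 0xef + (k : Int) + (if 2 ≤ n ∧ k = n - 1 then 0x80 else 0) + bs.sum + d := by
        simp [List.sum_append]; ring
      rw [hnum]
      simp [String.append_assoc]
    rw [hsplit, List.append_assoc,
        packLoop_no_boundary _ bs _ _ _ _ _ _ (by intro j hj; rw [hbslen] at hj; omega),
        hbslen, List.singleton_append, packLoop, if_pos (by omega : (k * 1024 + 1023 + 1) % 1024 = 0)]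
    have hrange : List.range' k (n - k) = k :: List.range' (k + 1) (n - (k + 1)) := by
      have : n - k = (n - (k + 1)) + 1 := by omega
      rw [this, List.range'_succ]
    by_cases hmark : k + 2 = n
    · rw [if_pos (by push_cast; omega : ((k * 1024 + 1023 : Nat) : Int) = ((n * 1024 : Nat) : Int) - 1 - 1024)]
      have hcond : (2 ≤ n ∧ k + 1 = n - 1) := by omega
      have := ih (k + 1) (pkgs ++ [packetB padded n k]) (by omega)
      rw [if_pos hcond, if_pos hcond] at this
      calc packLoop (n * 1024) (padded.drop ((k + 1) * 1024)) (k * 1024 + 1023 + 1)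
            (0xfe + 0xef + ((k : Int) + 1) + 0x80)
            ("fe,ef,80," ++ pyHex2 ((k : Int) + 1) ++ ",") ((k : Int) + 1)
            (pkgs ++ ["fe,ef," ++ (if 2 ≤ n ∧ k = n - 1 then "80" else "00") ++ "," ++ pyHex2 (k : Int) ++ ","
              ++ PySem.Str.join "" (bs.map (fun b => pyHex2 b ++ ",")) ++ pyHex2 d ++ ","
              ++ pyVerify (0xfe + 0xef + (k : Int) + (if 2 ≤ n ∧ k = n - 1 then 0x80 else 0) + bs.sum + d)])
          = packLoop (n * 1024) (padded.drop ((k + 1) * 1024)) ((k + 1) * 1024)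
            (0xfe + 0xef + ((k + 1 : Nat) : Int) + 0x80)
            ("fe,ef," ++ "80" ++ "," ++ pyHex2 ((k + 1 : Nat) : Int) ++ ",") ((k + 1 : Nat) : Int)
            (pkgs ++ [packetB padded n k]) := by
            rw [hpkt]
            congr 1
            omega
        _ = pkgs ++ (List.range' k (n - k)).map (packetB padded n) := by
            rw [this, hrange]
            simp
    · rw [if_neg (by push_cast; omega : ¬ ((k * 1024 + 1023 : Nat) : Int) = ((n * 1024 : Nat) : Int) - 1 - 1024)]
      have hcond : ¬ (2 ≤ n ∧ k + 1 = n - 1) := by omega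
      have := ih (k + 1) (pkgs ++ [packetB padded n k]) (by omega)
      rw [if_neg hcond, if_neg hcond] at this
      calc packLoop (n * 1024) (padded.drop ((k + 1) * 1024)) (k * 1024 + 1023 + 1)
            (0xfe + 0xef + ((k : Int) + 1))
            ("fe,ef,00," ++ pyHex2 ((k : Int) + 1) ++ ",") ((k : Int) + 1)
            (pkgs ++ ["fe,ef," ++ (if 2 ≤ n ∧ k = n - 1 then "80" else "00") ++ "," ++ pyHex2 (k : Int) ++ ","
              ++ PySem.Str.join "" (bs.map (fun b => pyHex2 b ++ ",")) ++ pyHex2 d ++ ","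
              ++ pyVerify (0xfe + 0xef + (k : Int) + (if 2 ≤ n ∧ k = n - 1 then 0x80 else 0) + bs.sum + d)])
          = packLoop (n * 1024) (padded.drop ((k + 1) * 1024)) ((k + 1) * 1024)
            (0xfe + 0xef + ((k + 1 : Nat) : Int) + 0)
            ("fe,ef," ++ "00" ++ "," ++ pyHex2 ((k + 1 : Nat) : Int) ++ ",") ((k + 1 : Nat) : Int)
            (pkgs ++ [packetB padded n k]) := by
            rw [hpkt]
            congr 1
            omega
        _ = pkgs ++ (List.range' k (n - k)).map (packetB padded n) := by
            rw [this, hrange]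
            simp

-- ===== VERDICT (by name: the statement is the Claim_ definition above) =====
theorem pack_data_spec : Claim_equal_pack_data := by
  intro data _
  unfold Spec_pack_data
  simp only [pack_data, pack_data_alt]
  set padded := if data.length % 1024 ≠ 0 then data ++ List.replicate (1024 - data.length % 1024) 255 else data with hpad
  have hmod : padded.length % 1024 = 0 := by
    by_cases h : data.length % 1024 = 0 <;> [simp [hpad, h]; (simp [hpad, h]; omega)]
  set n := padded.length / 1024 with hn
  have hlen : padded.length = n * 1024 := (Nat.div_mul_cancel (Nat.dvd_of_mod_eq_zero hmod)).symm
  have key := packLoop_chunks n padded hlen 0 (by omega) []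
  have hcond : ¬ (2 ≤ n ∧ 0 = n - 1) := by omega
  rw [if_neg hcond, if_neg hcond] at key
  simp only [Nat.zero_mul, List.drop_zero, Nat.sub_zero, Nat.cast_zero, List.nil_append] at key
  have e1 : (0xfe + 0xef + (0 : Int) + 0) = 0xfe + 0xef := by ring
  have e2 : ("fe,ef," ++ "00" ++ "," ++ pyHex2 (0 : Int) ++ ",") = "fe,ef,00,00," := by decide
  rw [e1, e2] at key
  rw [hlen, key, ← List.range_eq_range']
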